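-- pv_equiv track=rewrite | github.com/weizhixiaoyi/leetcode | nowcoder/company/0824-360/01.py | solve
-- ===== SOURCE A (Python) =====
-- def solve(s):
--     s_len = len(s)
--     s_rev = s[::-1]
--     if s_rev != s:
--         return False
--     s_could = ['A', 'H', 'I', 'M', 'O', 'T', 'V', 'W', 'X', 'Y']
--     for i in range(s_len):
--         if s[i] not in s_could:
--             return False
--     return True
-- ===== SOURCE B (Python) =====
-- ALLOWED = frozenset('AHIMOTVWXY')
--
-- def solve(s):
--     i, j = 0, len(s) - 1
--     while i <= j:
--         if s[i] != s[j] or s[i] not in ALLOWED or s[j] not in ALLOWED: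
--             return False
--         i += 1
--         j -= 1
--     return True
-- ===== Notes on version B (the rewrite author's own statement) =====
-- stated objective: simpler
-- what changed: Replaces A's reverse-then-compare pass plus a second full membership loop with a single two-pointer scan that checks the mirror equality and the allowed-set membership of both ends in one pass, without building a reversed string.
import Mathlib
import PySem

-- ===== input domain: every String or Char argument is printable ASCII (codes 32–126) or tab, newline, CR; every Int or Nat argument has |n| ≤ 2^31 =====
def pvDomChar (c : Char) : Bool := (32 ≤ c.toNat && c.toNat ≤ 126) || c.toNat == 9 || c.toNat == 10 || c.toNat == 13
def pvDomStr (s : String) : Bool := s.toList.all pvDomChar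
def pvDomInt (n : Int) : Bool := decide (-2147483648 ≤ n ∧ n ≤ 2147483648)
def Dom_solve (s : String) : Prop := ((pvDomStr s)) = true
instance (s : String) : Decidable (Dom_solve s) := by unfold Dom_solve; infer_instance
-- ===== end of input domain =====

-- B replaces A's reverse-then-compare pass plus a second membership loop with one two-pointer scan (simpler).

-- ===== PORT A =====
-- s_could = ['A', 'H', 'I', 'M', 'O', 'T', 'V', 'W', 'X', 'Y']
def sCould : List Char := ['A', 'H', 'I', 'M', 'O', 'T', 'V', 'W', 'X', 'Y']

-- the loop 'for i in range(s_len): if s[i] not in s_could: return False'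
-- (fuel = remaining iterations, a pure totality guard: fuel ≥ len - i always holds at the call)
def solveLoopA (fuel : Nat) (l : List Char) (i : Nat) : Bool :=
  match fuel with
  | 0 => true
  | fuel + 1 =>
    if h : i < l.length then
      if l[i] ∉ sCould then false
      else solveLoopA fuel l (i + 1)
    else true

def solve (s : String) : Bool :=
  let l := s.toList
  let sRev := l.reverse          -- s[::-1] (PySem.List.slice?_none_none_neg_one)
  if sRev ≠ l then false
  else solveLoopA l.length l 0

-- ===== PORT B =====
-- ALLOWED = frozenset('AHIMOTVWXY')
def allowedB : PySem.Set Char := PySem.Set.ofList "AHIMOTVWXY".toList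

-- the 'while i <= j' two-pointer loop; pyGetD is exact here: every call keeps 0 ≤ i ≤ j < len
-- (fuel = remaining iterations, a pure totality guard: fuel ≥ j + 1 - i always holds at the call)
def solveAltLoop (fuel : Nat) (l : List Char) (i j : Int) : Bool :=
  match fuel with
  | 0 => true
  | fuel + 1 =>
    if i ≤ j then
      if PySem.List.pyGetD l i ' ' != PySem.List.pyGetD l j ' '
          || !(PySem.Set.contains allowedB (PySem.List.pyGetD l i ' '))
          || !(PySem.Set.contains allowedB (PySem.List.pyGetD l j ' ')) then false
      else solveAltLoop fuel l (i + 1) (j - 1)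
    else true

def solve_alt (s : String) : Bool :=
  let l := s.toList
  solveAltLoop l.length l 0 (l.length - 1)

-- ===== PRECONDITION & SPEC =====
def Spec_solve (s : String) (out : Bool) : Prop := out = solve_alt s
instance (s : String) (out : Bool) : Decidable (Spec_solve s out) := by unfold Spec_solve; infer_instance

-- ===== CLAIM (what is proved, stated in full; the proofs are below) =====
def Claim_equal_solve : Prop := ∀ (s : String), Dom_solve s → Spec_solve s (solve s)

-- ===== LEMMAS AND PROOFS =====

theorem mem_allowedB (c : Char) : c ∈ allowedB ↔ c ∈ sCould := by
  simp [allowedB, sCould, PySem.Set.ofList]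

theorem loopA_iff (l : List Char) : ∀ (d i : Nat), l.length ≤ i + d →
    (solveLoopA d l i = true ↔ ∀ k (h : k < l.length), i ≤ k → l[k] ∈ sCould) := by
  intro d
  induction d with
  | zero =>
    intro i hd
    constructor
    · intro _ k hk hik; omega
    · intro _; rfl
  | succ d ih =>
    intro i hd
    rw [solveLoopA]
    by_cases h : i < l.length
    · simp only [dif_pos h]
      by_cases hm : l[i] ∈ sCould
      · rw [if_neg (by simp [hm])]
        rw [ih (i + 1) (by omega)]
        constructor
        · intro hall k hk hik
          rcases Nat.eq_or_lt_of_le hik with rfl | hlt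
          · exact hm
          · exact hall k hk hlt
        · intro hall k hk hik; exact hall k hk (by omega)
      · rw [if_pos hm]
        constructor
        · intro hfalse; cases hfalse
        · intro hall; exact absurd (hall i h le_rfl) hm
    · simp only [dif_neg h]
      constructor
      · intro _ k hk hik; omega
      · intro _; trivial

theorem loopB_iff (l : List Char) : ∀ (k : Nat) (i j : Int), 0 ≤ i → j < l.length →
    j + 1 - i ≤ (k : Int) →
    (solveAltLoop k l i j = true ↔
      ∀ m : Nat, i ≤ (m : Int) → (m : Int) ≤ j →
        PySem.List.pyGetD l m ' ' = PySem.List.pyGetD l (i + j - m) ' ' ∧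
        PySem.List.pyGetD l m ' ' ∈ sCould) := by
  intro k
  induction k with
  | zero =>
    intro i j hi hj hk
    constructor
    · intro _ m h1 h2; omega
    · intro _; rfl
  | succ k ih =>
    intro i j hi hj hk
    by_cases hij : i ≤ j
    · rw [solveAltLoop, if_pos hij]
      by_cases hgood : PySem.List.pyGetD l i ' ' = PySem.List.pyGetD l j ' ' ∧
          PySem.List.pyGetD l i ' ' ∈ sCould ∧ PySem.List.pyGetD l j ' ' ∈ sCould
      · obtain ⟨hab, ha, hb⟩ := hgood
        rw [if_neg (by simp [hab, mem_allowedB, hb])]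
        rw [ih (i + 1) (j - 1) (by omega) (by omega) (by omega)]
        constructor
        · intro hall m h1 h2
          rcases eq_or_lt_of_le h1 with hmi | hmi
          · rw [← hmi, show i + j - i = j by ring]
            exact ⟨hab, ha⟩
          · rcases eq_or_lt_of_le h2 with hmj | hmj
            · rw [hmj, show i + j - j = i by ring]
              exact ⟨hab.symm, hb⟩
            · have := hall m (by omega) (by omega)
              rwa [show i + 1 + (j - 1) - (m : Int) = i + j - m by ring] at this
        · intro hall m h1 h2
          have := hall m (by omega) (by omega)
          rwa [show i + j - (m : Int) = i + 1 + (j - 1) - m by ring] at this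
      · rw [if_pos (by
          rcases not_and_or.mp hgood with hab | hmem
          · simp [bne_iff_ne, hab]
          · rcases not_and_or.mp hmem with ha | hb
            · simp [mem_allowedB, ha]
            · simp [mem_allowedB, hb])]
        constructor
        · intro hfalse; cases hfalse
        · intro hall
          have hji : (0 : Int) ≤ j := le_trans hi hij
          have h1 := hall i.toNat (by omega) (by omega)
          have h2 := hall j.toNat (by omega) (by omega)
          rw [Int.toNat_of_nonneg hi, show i + j - i = j by ring] at h1
          rw [Int.toNat_of_nonneg hji, show i + j - j = i by ring] at h2
          exact (hgood ⟨h1.1, h1.2, h2.2⟩).elim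
    · rw [solveAltLoop, if_neg hij]
      constructor
      · intro _ m h1 h2; omega
      · intro _; rfl

theorem pyGetD_idx (l : List Char) (m : Nat) (hm : m < l.length) :
    PySem.List.pyGetD l (m : Int) ' ' = l[m] := by
  rw [PySem.List.pyGetD_natCast]
  exact List.getD_eq_getElem l ' ' hm

theorem solve_spec : Claim_equal_solve := by
  intro s _
  unfold Spec_solve solve solve_alt
  dsimp only
  set l := s.toList with hl
  set n := l.length with hn
  rw [Bool.eq_iff_iff]
  rw [loopB_iff l n 0 ((n : Int) - 1) (by omega) (by omega) (by omega)]
  by_cases hrev : l.reverse = l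
  · rw [if_neg (by simpa using hrev)]
    rw [loopA_iff l n 0 (by omega)]
    constructor
    · intro hall m h0 hmn
      have hm : m < n := by omega
      have hmn' : n - 1 - m < n := by omega
      rw [show (0 : Int) + ((n : Int) - 1) - (m : Int) = ((n - 1 - m : Nat) : Int) by omega]
      rw [pyGetD_idx l m hm, pyGetD_idx l (n - 1 - m) hmn']
      refine ⟨?_, hall m hm (Nat.zero_le m)⟩
      have e1 : l.reverse[m]'(by simpa using hm) = l[m]'hm :=
        List.getElem_of_eq hrev (by simpa using hm)
      have e2 : l.reverse[m]'(by simpa using hm) = l[l.length - 1 - m]'(by omega) :=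
        List.getElem_reverse _
      rw [← e1, e2]
    · intro hall k hk _
      have := hall k (by omega) (by omega)
      rw [pyGetD_idx l k hk] at this
      exact this.2
  · rw [if_pos (by simpa using hrev)]
    constructor
    · intro hfalse
      exact absurd hfalse (by simp)
    · intro hall
      refine (hrev (List.ext_getElem (by simp) (fun k h1 h2 => ?_))).elim
      have hk : k < n := h2
      have key := hall k (by omega) (by omega)
      rw [show (0 : Int) + ((n : Int) - 1) - (k : Int) = ((n - 1 - k : Nat) : Int) by omega] at key
      rw [pyGetD_idx l k hk, pyGetD_idx l (n - 1 - k) (by omega)] at key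
      have e2 : l.reverse[k]'h1 = l[l.length - 1 - k]'(by omega) :=
        List.getElem_reverse _
      rw [e2]
      exact key.1.symm
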